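-- pv_equiv track=rewrite | github.com/rafalp/Misago | misago/collections/dicts.py | set_key_before
-- ===== SOURCE A (Python) =====
-- from typing import Any
--
-- def set_key_before(src: dict, before: Any, key: Any, value: Any) -> dict:
--     if before not in src:
--         raise KeyError(before)
--
--     new_dict = {}
--     for src_key, src_value in src.items():
--         if src_key == before:
--             new_dict[key] = value
--         new_dict[src_key] = src_value
--
--     return new_dict
-- ===== SOURCE B (Python) =====
-- def set_key_before(src: dict, before, key, value) -> dict:
--     if before not in src:
--         raise KeyError(before)
--     items = list(src.items())
--     idx = list(src).index(before)
--     new_dict = dict(items[:idx])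
--     new_dict[key] = value
--     new_dict.update(items[idx:])
--     return new_dict
-- ===== Notes on version B (the rewrite author's own statement) =====
-- stated objective: simpler
-- what changed: B locates the position of `before` once with list.index and rebuilds the dict from the two slices around it (prefix, then the new key, then the suffix via update), instead of A's per-element loop with a conditional insert at every step.
import Mathlib
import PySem

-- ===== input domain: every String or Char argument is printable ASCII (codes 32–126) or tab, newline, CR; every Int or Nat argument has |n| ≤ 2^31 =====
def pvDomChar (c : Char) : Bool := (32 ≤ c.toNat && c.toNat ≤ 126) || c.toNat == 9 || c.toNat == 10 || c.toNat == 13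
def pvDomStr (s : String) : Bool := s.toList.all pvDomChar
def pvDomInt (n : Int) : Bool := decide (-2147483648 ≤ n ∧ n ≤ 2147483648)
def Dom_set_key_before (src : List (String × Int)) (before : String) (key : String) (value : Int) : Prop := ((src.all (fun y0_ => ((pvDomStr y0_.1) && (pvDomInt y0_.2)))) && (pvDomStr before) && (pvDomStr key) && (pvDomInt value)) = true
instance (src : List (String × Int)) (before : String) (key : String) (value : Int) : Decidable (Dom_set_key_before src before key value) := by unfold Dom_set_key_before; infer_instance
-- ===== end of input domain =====

-- B rebuilds the dict from the two slices around the (pre-computed) position of `before`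
-- instead of A's per-element loop with a conditional insert; objective: simpler decomposition.

-- ===== PORT A =====
def set_key_before (src : List (String × Int)) (before : String) (key : String) (value : Int) : List (String × Int) :=
  if before ∈ src.map Prod.fst then
    (src.foldl
      (fun d p => (if p.1 == before then d.insert key value else d).insert p.1 p.2)
      (PySem.Dict.empty : PySem.Dict String Int)).items
  else []  -- Python: raise KeyError(before); excluded by Pre_

-- ===== PORT B =====
def set_key_before_alt (src : List (String × Int)) (before : String) (key : String) (value : Int) : List (String × Int) :=
  if before ∈ src.map Prod.fst then
    match PySem.List.index? (src.map Prod.fst) before with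
    | none => []  -- unreachable: the guard above ensures `before` is a key
    | some idx =>
      let items := src
      let d := PySem.Dict.ofList (PySem.List.slice items none (some (idx : Int)))
      let d := d.insert key value
      (d.update (PySem.List.slice items (some (idx : Int)) none)).items
  else []  -- Python: raise KeyError(before); excluded by Pre_

-- ===== PRECONDITION & SPEC =====
-- Pre_ excludes (i) inputs where A raises KeyError (`before` not a key) and (ii) association
-- lists with duplicate keys, which never arise from the Python argument `src: dict` (dict keys
-- are unique); on the Python side no returning input is excluded.
def Pre_set_key_before (src : List (String × Int)) (before : String) (key : String) (value : Int) : Prop :=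
  before ∈ src.map Prod.fst ∧ (src.map Prod.fst).Nodup
instance (src : List (String × Int)) (before : String) (key : String) (value : Int) : Decidable (Pre_set_key_before src before key value) := by unfold Pre_set_key_before; infer_instance

def pvWitness_set_key_before : (List (String × Int)) × String × String × Int :=
  ([("a", 1), ("b", 2), ("c", 3)], "b", "k", 9)

def Spec_set_key_before (src : List (String × Int)) (before : String) (key : String) (value : Int) (out : List (String × Int)) : Prop := out = set_key_before_alt src before key value
instance (src : List (String × Int)) (before : String) (key : String) (value : Int) (out : List (String × Int)) : Decidable (Spec_set_key_before src before key value out) := by unfold Spec_set_key_before; infer_instance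

-- ===== CLAIM (what is proved, stated in full; the proofs are below) =====
def Claim_equal_set_key_before : Prop := ∀ (src : List (String × Int)) (before : String) (key : String) (value : Int), Dom_set_key_before src before key value → Pre_set_key_before src before key value → Spec_set_key_before src before key value (set_key_before src before key value)

-- ===== LEMMAS AND PROOFS =====

-- On a block whose keys all differ from `before`, A's conditional step is a plain insert.
theorem foldl_step_eq_insert (before : String) (key : String) (value : Int)
    (l : List (String × Int)) (d : PySem.Dict String Int)
    (h : ∀ x ∈ l, x.1 ≠ before) :
    l.foldl (fun d p => (if p.1 == before then d.insert key value else d).insert p.1 p.2) d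
      = l.foldl (fun d p => d.insert p.1 p.2) d := by
  induction l generalizing d with
  | nil => rfl
  | cons x xs ih =>
    have hx : x.1 ≠ before := h x (List.mem_cons_self)
    rw [List.foldl_cons, List.foldl_cons, if_neg (by simpa using hx)]
    exact ih _ (fun y hy => h y (List.mem_cons_of_mem _ hy))

-- ===== VERDICT (by name: the statement is the Claim_ definition above) =====
theorem set_key_before_spec : Claim_equal_set_key_before := by
  intro src before key value _hdom hpre
  obtain ⟨hmem, hnd⟩ := hpre
  -- locate `before` and split src around it
  have hidx : ∃ k, PySem.List.index? (src.map Prod.fst) before = some k := by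
    rcases Option.isSome_iff_exists.mp ((PySem.List.index?_isSome_iff _ _).mpr hmem) with ⟨k, hk⟩
    exact ⟨k, hk⟩
  obtain ⟨k, hk⟩ := hidx
  obtain ⟨pre, suf, hsplit, hlen, hnotpre⟩ := (PySem.List.index?_eq_some_iff _ _ _).mp hk
  obtain ⟨p, s', hsrc, hp, hs'⟩ := List.map_eq_append_iff.mp hsplit
  obtain ⟨bv, s, hs'eq, hbv, hs⟩ := List.map_eq_cons_iff.mp hs'
  subst hsrc hs'eq hp hs hbv
  -- before not among suffix keys (from Nodup)
  have hnotsuf : ∀ x ∈ s, x.1 ≠ bv.1 := by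
    have h2 : (bv.1 :: s.map Prod.fst).Nodup := by
      rw [hsplit] at hnd
      exact hnd.of_append_right
    intro x hx hxe
    exact (List.nodup_cons.mp h2).1 (hxe ▸ List.mem_map_of_mem hx)
  have hnotprek : ∀ x ∈ p, x.1 ≠ bv.1 := by
    intro x hx hxe
    exact hnotpre (hxe ▸ List.mem_map_of_mem hx)
  have hk' : k = p.length := by simpa using hlen.symm
  subst hk'
  -- evaluate both sides
  unfold Spec_set_key_before set_key_before set_key_before_alt
  rw [if_pos hmem, if_pos hmem, hk]
  simp only
  rw [PySem.List.slice_to_natCast, PySem.List.slice_from_natCast,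
      List.take_left, List.drop_left]
  rw [List.foldl_append]
  rw [foldl_step_eq_insert bv.1 key value p _ hnotprek]
  simp only [List.foldl_cons, beq_self_eq_true, if_pos]
  rw [foldl_step_eq_insert bv.1 key value s _ hnotsuf]
  rfl
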